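-- pv_equiv track=rewrite | github.com/jeironpro/coding-bat | coding-bat-python/calentamiento2.py | ultimos2
-- ===== SOURCE A (Python) =====
-- def ultimos2(cadena):
--     if len(cadena) < 2:
--         return 0
--
--     i = 0
--     contador = 0
--
--     while (i < len(cadena)-2):
--         if cadena[i:i+2] == cadena[len(cadena)-2:]:
--             contador += 1
--         i += 1
--
--     return contador
-- ===== SOURCE B (Python) =====
-- def ultimos2(cadena):
--     if len(cadena) < 2:
--         return 0
--     last = cadena[-2:]
--     tabla = {}
--     for i in range(len(cadena) - 1):
--         par = cadena[i:i+2]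
--         tabla[par] = tabla.get(par, 0) + 1
--     return tabla[last] - 1
-- ===== Notes on version B (the rewrite author's own statement) =====
-- stated objective: alternative
-- what changed: B tabulates every adjacent 2-char substring into a dict in one pass and returns table[last]-1 (the final pair always contributes exactly one occurrence), instead of A's index loop comparing each pair against the target.
import Mathlib
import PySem

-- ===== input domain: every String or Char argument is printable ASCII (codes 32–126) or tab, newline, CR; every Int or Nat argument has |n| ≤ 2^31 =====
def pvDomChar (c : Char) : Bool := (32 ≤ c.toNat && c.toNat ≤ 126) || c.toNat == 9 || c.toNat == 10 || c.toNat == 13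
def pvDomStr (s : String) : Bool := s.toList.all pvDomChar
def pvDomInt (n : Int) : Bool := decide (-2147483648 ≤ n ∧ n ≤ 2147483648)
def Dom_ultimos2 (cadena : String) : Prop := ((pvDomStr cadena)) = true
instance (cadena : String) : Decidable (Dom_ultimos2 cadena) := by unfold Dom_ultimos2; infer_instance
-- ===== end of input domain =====

-- B builds a one-pass dict of all adjacent 2-char substrings and returns table[last]-1,
-- instead of A's per-index comparison loop against the fixed last-two-char target.
-- ===== PORT A =====
def ultimos2 (cadena : String) : Int :=
  let cs := cadena.toList
  let n : Int := cs.length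
  if n < 2 then 0
  else
    -- while (i < n-2): if cadena[i:i+2] == cadena[n-2:]: contador += 1
    (PySem.List.pyRange 0 (n - 2) 1).foldl
      (fun contador i =>
        if PySem.List.slice cs (some i) (some (i + 2)) =
           PySem.List.slice cs (some (n - 2)) none
        then contador + 1 else contador) 0

-- ===== PORT B =====
def ultimos2_alt (cadena : String) : Int :=
  let cs := cadena.toList
  let n : Int := cs.length
  if n < 2 then 0
  else
    let last := PySem.List.slice cs (some (-2 : Int)) none
    let tabla :=
      (PySem.List.pyRange 0 (n - 1) 1).foldl
        (fun (tabla : PySem.Dict (List Char) Int) i =>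
          let par := PySem.List.slice cs (some i) (some (i + 2))
          tabla.insert par (tabla.getD par 0 + 1))
        PySem.Dict.empty
    tabla.getD last 0 - 1

-- ===== PRECONDITION & SPEC =====
def Spec_ultimos2 (cadena : String) (out : Int) : Prop := out = ultimos2_alt cadena
instance (cadena : String) (out : Int) : Decidable (Spec_ultimos2 cadena out) := by unfold Spec_ultimos2; infer_instance

-- ===== CLAIM (what is proved, stated in full; the proofs are below) =====
def Claim_equal_ultimos2 : Prop := ∀ (cadena : String), Dom_ultimos2 cadena → Spec_ultimos2 cadena (ultimos2 cadena)

-- ===== LEMMAS AND PROOFS =====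

-- ===== VERDICT (by name: the statement is the Claim_ definition above) =====
-- counting fold = List.count on the mapped list
theorem foldl_count (t : List Char) : ∀ (ps : List (List Char)) (c : Int),
    ps.foldl (fun acc p => if p = t then acc + 1 else acc) c = c + ps.count t
  | [], c => by simp
  | p :: ps, c => by
    simp only [List.foldl_cons, foldl_count t ps, List.count_cons]
    by_cases h : p = t <;> simp [h] <;> ring

theorem ultimos2_spec : Claim_equal_ultimos2 := by
  intro cadena _
  unfold Spec_ultimos2 ultimos2 ultimos2_alt
  set cs := cadena.toList with hcs
  simp only []
  by_cases hn : (cs.length : Int) < 2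
  · simp [hn]
  · simp only [if_neg hn]
    have h2 : 2 ≤ cs.length := by exact_mod_cast not_lt.mp hn
    -- B's fold builds counter of the mapped pair list
    have hB :
        (PySem.List.pyRange 0 ((cs.length : Int) - 1) 1).foldl
          (fun (tabla : PySem.Dict (List Char) Int) i =>
            let par := PySem.List.slice cs (some i) (some (i + 2))
            tabla.insert par (tabla.getD par 0 + 1))
          PySem.Dict.empty
        = PySem.Dict.counter
            ((PySem.List.pyRange 0 ((cs.length : Int) - 1) 1).map
              (fun i => PySem.List.slice cs (some i) (some (i + 2)))) := by
      rw [← PySem.Dict.foldl_insert_getD_add_one_eq_counter, List.foldl_map]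
    rw [hB, PySem.Dict.getD_counter]
    -- split pyRange 0 (n-1) = pyRange 0 (n-2) ++ [n-2]
    have hsplit : PySem.List.pyRange 0 ((cs.length : Int) - 1) 1
        = PySem.List.pyRange 0 ((cs.length : Int) - 2) 1 ++ [(cs.length : Int) - 2] := by
      have : ((cs.length : Int) - 1) = ((cs.length : Int) - 2) + 1 := by ring
      rw [this, PySem.List.pyRange_one_succ_right (by omega)]
    -- the two "last two chars" slices agree and equal the pair at index n-2
    have hlastB : PySem.List.slice cs (some (-2 : Int)) none = cs.drop (cs.length - 2) := by
      rw [PySem.List.slice_from_neg_ofNat cs 2 (by norm_num)]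
    have hlastA : PySem.List.slice cs (some ((cs.length : Int) - 2)) none
        = cs.drop (cs.length - 2) := by
      have h := PySem.List.slice_from cs (a := (cs.length : Int) - 2) (by omega)
      rw [h]
      congr 1
      omega
    have hpair : PySem.List.slice cs (some ((cs.length : Int) - 2))
        (some ((cs.length : Int) - 2 + 2)) = cs.drop (cs.length - 2) := by
      have h := PySem.List.slice_toNat cs (a := (cs.length : Int) - 2)
        (b := (cs.length : Int) - 2 + 2) (by omega) (by omega)
      rw [h]
      have h1 : ((cs.length : Int) - 2).toNat = cs.length - 2 := by omega
      have h2' : ((cs.length : Int) - 2 + 2).toNat = cs.length := by omega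
      rw [h1, h2']
      exact List.take_of_length_le (by simp)
    rw [hsplit]
    simp only [List.map_append, List.map_cons, List.map_nil, List.count_append, hpair, hlastB]
    rw [hlastA]
    rw [← List.foldl_map (f := fun i => PySem.List.slice cs (some i) (some (i + 2)))
        (g := fun (acc : Int) p => if p = cs.drop (cs.length - 2) then acc + 1 else acc)]
    rw [foldl_count]
    have hone : (List.count (cs.drop (cs.length - 2)) [cs.drop (cs.length - 2)]) = 1 := by
      simp
    rw [hone]
    push_cast
    ring
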